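-- pv_equiv track=rewrite | github.com/mahrouf13/asl | src/function.py | text_to_tokens
-- ===== SOURCE A (Python) =====
-- def text_to_tokens(text):
--     tokens = []
--     for ch in text.upper():
--         if ch.isalpha():
--             tokens.append(ch)
--         elif ch == ' ' and tokens and tokens[-1] != '_SPACE_':
--             tokens.append('_SPACE_')
--     if tokens and tokens[-1] == '_SPACE_':
--         tokens.pop()
--     return tokens
-- ===== SOURCE B (Python) =====
-- def text_to_tokens(text):
--     words = []
--     current = []
--     for ch in text.upper():
--         if ch.isalpha():
--             current.append(ch)
--         elif ch == ' ':
--             if current: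
--                 words.append(current)
--                 current = []
--     if current:
--         words.append(current)
--     out = []
--     first = True
--     for word in words:
--         if not first:
--             out.append('_SPACE_')
--         out.extend(word)
--         first = False
--     return out
-- ===== Notes on version B (the rewrite author's own statement) =====
-- stated objective: alternative
-- what changed: B first segments the uppercased text into words (maximal alphabetic runs, flushed only when non-empty) and then renders them joined by single '_SPACE_' markers, replacing A's eager insert-marker-then-pop-trailing single pass with its tokens[-1] inspection.
import Mathlib
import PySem

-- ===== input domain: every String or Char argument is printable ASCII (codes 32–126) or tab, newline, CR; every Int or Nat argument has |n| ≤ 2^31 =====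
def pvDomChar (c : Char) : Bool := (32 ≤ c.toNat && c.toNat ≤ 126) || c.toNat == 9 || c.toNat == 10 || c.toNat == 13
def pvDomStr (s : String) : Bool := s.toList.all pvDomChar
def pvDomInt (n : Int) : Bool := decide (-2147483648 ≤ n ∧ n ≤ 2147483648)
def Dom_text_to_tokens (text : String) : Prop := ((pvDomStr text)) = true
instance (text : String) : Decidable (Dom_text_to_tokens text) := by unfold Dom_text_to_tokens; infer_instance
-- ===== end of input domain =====

-- B segments the uppercased text into words and joins them with '_SPACE_' markers,
-- instead of A's eager marker insertion with a trailing pop (objective: alternative).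

-- ===== PORT A =====
-- one loop step of A: append letters; append a '_SPACE_' marker on a space
-- unless tokens is empty or already ends in a marker
def aStep (tokens : List String) (ch : Char) : List String :=
  if PySem.Chars.isalpha ch then tokens ++ [ch.toString]
  else if ch = ' ' ∧ tokens ≠ [] ∧ tokens.getLastD "" ≠ "_SPACE_" then tokens ++ ["_SPACE_"]
  else tokens

-- A's final fix-up: pop a trailing '_SPACE_'
def aFin (tokens : List String) : List String :=
  if tokens ≠ [] ∧ tokens.getLastD "" = "_SPACE_" then tokens.dropLast else tokens

def text_to_tokens (text : String) : List String :=
  aFin ((PySem.Str.upper text).toList.foldl aStep [])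

-- ===== PORT B =====
-- first pass of B: collect maximal alphabetic runs as words (flush only when non-empty)
def collectWords : List Char → List Char → List (List Char) → List (List Char)
  | [], cur, words => if cur ≠ [] then words ++ [cur] else words
  | ch :: rest, cur, words =>
    if PySem.Chars.isalpha ch then collectWords rest (cur ++ [ch]) words
    else if ch = ' ' then
      if cur ≠ [] then collectWords rest [] (words ++ [cur]) else collectWords rest cur words
    else collectWords rest cur words

-- second pass of B: emit a word's letters, preceded by '_SPACE_' except for the first word
def renderStep (st : List String × Bool) (word : List Char) : List String × Bool :=
  ((if st.2 then st.1 else st.1 ++ ["_SPACE_"]) ++ word.map Char.toString, false)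

def text_to_tokens_alt (text : String) : List String :=
  ((collectWords (PySem.Str.upper text).toList [] []).foldl renderStep ([], true)).1

-- ===== PRECONDITION & SPEC =====
def Spec_text_to_tokens (text : String) (out : List String) : Prop := out = text_to_tokens_alt text
instance (text : String) (out : List String) : Decidable (Spec_text_to_tokens text out) := by unfold Spec_text_to_tokens; infer_instance

-- ===== CLAIM (what is proved, stated in full; the proofs are below) =====
def Claim_equal_text_to_tokens : Prop := ∀ (text : String), Dom_text_to_tokens text → Spec_text_to_tokens text (text_to_tokens text)

-- ===== LEMMAS AND PROOFS =====

-- letters of a word as one-character token strings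
def strs (w : List Char) : List String := w.map Char.toString

-- the rendered output for a finished word list
def R : List (List Char) → List String
  | [] => []
  | w :: ws => strs w ++ ws.flatMap (fun v => "_SPACE_" :: strs v)

lemma renderFold (ws : List (List Char)) : ∀ out : List String,
    (ws.foldl renderStep (out, false)).1 = out ++ ws.flatMap (fun v => "_SPACE_" :: strs v) := by
  induction ws with
  | nil => intro out; simp
  | cons w ws ih =>
    intro out
    simp only [List.foldl_cons, renderStep, List.flatMap_cons]
    rw [ih]
    simp [strs, List.append_assoc]

lemma renderEq (ws : List (List Char)) : (ws.foldl renderStep ([], true)).1 = R ws := by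
  cases ws with
  | nil => simp [R]
  | cons w ws =>
    simp only [List.foldl_cons, renderStep, R]
    rw [renderFold]
    simp [strs]

lemma Rsnoc (ws : List (List Char)) (w : List Char) :
    R (ws ++ [w]) = R ws ++ (if ws = [] then [] else ["_SPACE_"]) ++ strs w := by
  cases ws with
  | nil => simp [R]
  | cons w0 ws' => simp [R, List.flatMap_append]

lemma char_ne_marker (c : Char) : c.toString ≠ "_SPACE_" := by
  intro h
  have h1 : c.toString.length = ("_SPACE_" : String).length := congrArg String.length h
  have h2 : ("_SPACE_" : String).length = 7 := rfl
  simp [h2] at h1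

lemma getLastD_concat' (l : List String) (a d : String) : (l ++ [a]).getLastD d = a := by
  induction l with
  | nil => rfl
  | cons x xs ih =>
    cases xs with
    | nil => rfl
    | cons y ys => simpa using ih

-- a rendered word list ending in a non-empty word ends in a letter token
lemma last_R_snoc (ws : List (List Char)) (cur : List Char) (h : cur ≠ []) :
    (R (ws ++ [cur])) ≠ [] ∧ (R (ws ++ [cur])).getLastD "" ≠ "_SPACE_" := by
  obtain ⟨cur', c, rfl⟩ := (List.eq_nil_or_concat cur).resolve_left h
  rw [Rsnoc]
  have hs : strs (cur'.concat c) = strs cur' ++ [c.toString] := by simp [strs]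
  rw [hs]
  refine ⟨by simp, ?_⟩
  rw [← List.append_assoc, getLastD_concat']
  exact char_ne_marker c

-- the main invariant: A's fold from each of its three reachable shapes
-- computes the render of B's word collection
lemma main_inv (cs : List Char) :
    (∀ ws : List (List Char), ws ≠ [] →
        aFin (cs.foldl aStep (R ws ++ ["_SPACE_"])) = R (collectWords cs [] ws)) ∧
    (∀ (ws : List (List Char)) (cur : List Char), cur ≠ [] →
        aFin (cs.foldl aStep (R (ws ++ [cur]))) = R (collectWords cs cur ws)) ∧
    aFin (cs.foldl aStep []) = R (collectWords cs [] []) := by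
  induction cs with
  | nil =>
    refine ⟨?_, ?_, ?_⟩
    · intro ws hws
      simp only [List.foldl_nil, collectWords, aFin]
      rw [if_pos ⟨by simp, by rw [getLastD_concat']⟩]
      simp
    · intro ws cur hcur
      obtain ⟨h1, h2⟩ := last_R_snoc ws cur hcur
      simp only [List.foldl_nil, collectWords, aFin]
      rw [if_neg (by tauto), if_pos hcur]
    · simp [aFin, collectWords, R]
  | cons ch cs ih =>
    obtain ⟨ih1, ih2, ih3⟩ := ih
    by_cases ha : PySem.Chars.isalpha ch = true
    · refine ⟨?_, ?_, ?_⟩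
      · intro ws hws
        simp only [List.foldl_cons, aStep, collectWords, ha, if_true]
        have h : R ws ++ ["_SPACE_"] ++ [ch.toString] = R (ws ++ [[ch]]) := by
          rw [Rsnoc, if_neg hws]; simp [strs]
        rw [h]
        exact ih2 ws [ch] (by simp)
      · intro ws cur hcur
        simp only [List.foldl_cons, aStep, collectWords, ha, if_true]
        have h : R (ws ++ [cur]) ++ [ch.toString] = R (ws ++ [cur ++ [ch]]) := by
          rw [Rsnoc, Rsnoc]; simp [strs]
        rw [h]
        exact ih2 ws (cur ++ [ch]) (by simp)
      · simp only [List.foldl_cons, aStep, collectWords, ha, if_true]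
        have h : ([] : List String) ++ [ch.toString] = R ([] ++ [[ch]]) := by
          rw [Rsnoc]; simp [strs, R]
        rw [h]
        exact ih2 [] [ch] (by simp)
    · by_cases hsp : ch = ' '
      · subst hsp
        have ha' : PySem.Chars.isalpha ' ' = false := by decide
        refine ⟨?_, ?_, ?_⟩
        · intro ws hws
          simp only [List.foldl_cons, aStep, collectWords, ha', if_false, Bool.false_eq_true,
            true_and, if_true]
          rw [if_neg (by rw [getLastD_concat']; tauto)]
          rw [if_neg (by simp)]
          exact ih1 ws hws
        · intro ws cur hcur
          obtain ⟨h1, h2⟩ := last_R_snoc ws cur hcur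
          simp only [List.foldl_cons, aStep, collectWords, ha', if_false, Bool.false_eq_true,
            true_and, if_true]
          rw [if_pos ⟨h1, h2⟩, if_pos hcur]
          exact ih1 (ws ++ [cur]) (by simp)
        · simp only [List.foldl_cons, aStep, collectWords, ha', if_false, Bool.false_eq_true,
            true_and, if_true]
          rw [if_neg (by tauto), if_neg (by tauto)]
          exact ih3
      · refine ⟨?_, ?_, ?_⟩
        · intro ws hws
          simp only [List.foldl_cons, aStep, collectWords, ha, hsp, if_false, false_and]
          exact ih1 ws hws
        · intro ws cur hcur
          simp only [List.foldl_cons, aStep, collectWords, ha, hsp, if_false, false_and]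
          exact ih2 ws cur hcur
        · simp only [List.foldl_cons, aStep, collectWords, ha, hsp, if_false, false_and]
          exact ih3

-- ===== VERDICT (by name: the statement is the Claim_ definition above) =====
theorem text_to_tokens_spec : Claim_equal_text_to_tokens := by
  intro text _
  unfold Spec_text_to_tokens text_to_tokens text_to_tokens_alt
  rw [renderEq]
  exact (main_inv (PySem.Str.upper text).toList).2.2
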